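-- pv_equiv track=rewrite | github.com/TwopTheCreator/gen2all | gen2all/core/token_processor.py | _merge_word
-- ===== SOURCE A (Python) =====
-- from typing import List, Dict, Any, Optional, Tuple, Set
--
-- def _merge_word(word: List[str], pair: Tuple[str, str]) -> List[str]:
--     new_word = []
--     i = 0
--     while i < len(word):
--         if i < len(word) - 1 and word[i] == pair[0] and word[i + 1] == pair[1]:
--             new_word.append(pair[0] + pair[1])
--             i += 2
--         else:
--             new_word.append(word[i])
--             i += 1
--     return new_word
-- ===== SOURCE B (Python) =====
-- def _merge_word(word, pair):
--     first, second = pair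
--     new_word = []
--     i = 0
--     n = len(word)
--     while i < n:
--         try:
--             j = word.index(first, i)
--         except ValueError:
--             new_word.extend(word[i:])
--             break
--         new_word.extend(word[i:j])
--         i = j
--         if i < n - 1 and word[i + 1] == second:
--             new_word.append(first + second)
--             i += 2
--         else:
--             new_word.append(first)
--             i += 1
--     return new_word
-- ===== Notes on version B (the rewrite author's own statement) =====
-- stated objective: faster
-- what changed: B traverses by jumping with word.index(first, i) to each occurrence of the first symbol and bulk-copying the untouched slices (GPT-2 BPE style), instead of testing the pair condition at every position in Python.
import Mathlib
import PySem

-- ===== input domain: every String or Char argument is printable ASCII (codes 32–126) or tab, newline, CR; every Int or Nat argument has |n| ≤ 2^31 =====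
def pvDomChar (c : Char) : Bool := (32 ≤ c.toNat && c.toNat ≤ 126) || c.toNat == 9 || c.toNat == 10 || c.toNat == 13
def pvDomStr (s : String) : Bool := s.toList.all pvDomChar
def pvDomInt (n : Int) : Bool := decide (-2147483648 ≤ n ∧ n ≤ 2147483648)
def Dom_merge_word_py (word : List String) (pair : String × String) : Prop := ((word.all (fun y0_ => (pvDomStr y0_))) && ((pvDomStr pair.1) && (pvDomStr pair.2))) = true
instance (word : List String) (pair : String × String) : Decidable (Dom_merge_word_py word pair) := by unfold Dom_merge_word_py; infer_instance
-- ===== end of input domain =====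

-- B rewrites the position-by-position BPE merge loop in the GPT-2 style: it jumps with
-- word.index(first, i) to the next occurrence of the first symbol, bulk-copies the slice
-- in between, and only there tests the second symbol (alternative decomposition, same cost).

-- ===== PORT A =====
-- A's while loop over index i, one or two positions at a time, as structural recursion
-- over the remaining suffix word[i:]: the two-element pattern is i < len(word)-1.
def pvMergeA (p1 p2 : String) : List String → List String
  | [] => []
  | [x] => [x]
  | x :: y :: rest =>
    if x = p1 ∧ y = p2 then (p1 ++ p2) :: pvMergeA p1 p2 rest
    else x :: pvMergeA p1 p2 (y :: rest)

def merge_word_py (word : List String) (pair : String × String) : List String :=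
  pvMergeA pair.1 pair.2 word

-- ===== PORT B =====
-- B's while loop: new_word = acc, word.index(first, i) = PySem.List.index? on word[i:]
-- (none = ValueError → flush word[i:] and stop), word[i:j] copied in bulk, then the
-- pair test at the landing position.
def pvMergeB (word : List String) (p1 p2 : String) (i : Nat) (acc : List String) : List String :=
  if _h : i < word.length then
    match PySem.List.index? (word.drop i) p1 with
    | none => acc ++ word.drop i
    | some r =>
      let j := i + r
      let acc1 := acc ++ (word.drop i).take r
      if j + 1 < word.length ∧ word.getD (j + 1) "" = p2 then
        pvMergeB word p1 p2 (j + 2) (acc1 ++ [p1 ++ p2])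
      else
        pvMergeB word p1 p2 (j + 1) (acc1 ++ [p1])
  else acc
termination_by word.length - i
decreasing_by all_goals omega

def merge_word_py_alt (word : List String) (pair : String × String) : List String :=
  pvMergeB word pair.1 pair.2 0 []

-- ===== PRECONDITION & SPEC =====
def Spec_merge_word_py (word : List String) (pair : String × String) (out : List String) : Prop := out = merge_word_py_alt word pair
instance (word : List String) (pair : String × String) (out : List String) : Decidable (Spec_merge_word_py word pair out) := by unfold Spec_merge_word_py; infer_instance

-- ===== CLAIM (what is proved, stated in full; the proofs are below) =====
def Claim_equal_merge_word_py : Prop := ∀ (word : List String) (pair : String × String), Dom_merge_word_py word pair → Spec_merge_word_py word pair (merge_word_py word pair)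

-- ===== LEMMAS AND PROOFS =====

-- A prefix containing no occurrence of p1 passes through pvMergeA untouched.
theorem pvMergeA_skip (p1 p2 : String) (pre tail : List String) (hp : p1 ∉ pre) :
    pvMergeA p1 p2 (pre ++ tail) = pre ++ pvMergeA p1 p2 tail := by
  induction pre with
  | nil => simp
  | cons x l ih =>
    have hx : x ≠ p1 := fun h => hp (h ▸ List.mem_cons_self)
    have hl : p1 ∉ l := fun h => hp (List.mem_cons_of_mem _ h)
    cases hlt : l ++ tail with
    | nil =>
      rcases List.append_eq_nil_iff.mp hlt with ⟨h1, h2⟩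
      subst h1; subst h2; simp [pvMergeA]
    | cons y rest =>
      have hstep : pvMergeA p1 p2 ((x :: l) ++ tail) = x :: pvMergeA p1 p2 (l ++ tail) := by
        rw [List.cons_append, hlt, pvMergeA, if_neg (fun h => hx h.1), ← hlt]
      rw [hstep, ih hl, List.cons_append]

-- No occurrence of p1 at all → nothing merges.
theorem pvMergeA_none (p1 p2 : String) (l : List String) (hp : p1 ∉ l) :
    pvMergeA p1 p2 l = l := by
  have h0 : pvMergeA p1 p2 [] = [] := rfl
  simpa [h0] using pvMergeA_skip p1 p2 l [] hp

-- Loop invariant: pvMergeB from position i with accumulator acc produces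
-- acc ++ pvMergeA applied to the remaining suffix.
theorem pvMergeB_eq (word : List String) (p1 p2 : String) :
    ∀ i acc, pvMergeB word p1 p2 i acc = acc ++ pvMergeA p1 p2 (word.drop i) := by
  suffices hgen : ∀ k i acc, word.length - i ≤ k →
      pvMergeB word p1 p2 i acc = acc ++ pvMergeA p1 p2 (word.drop i) by
    intro i acc; exact hgen word.length i acc (by omega)
  intro k
  induction k with
  | zero =>
    intro i acc hle
    have h : ¬ i < word.length := by omega
    rw [pvMergeB]
    simp only [h, dif_neg, not_false_iff]
    rw [List.drop_eq_nil_of_le (by omega), pvMergeA]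
    simp
  | succ k ih => ?_
  intro i acc hle
  rw [pvMergeB]
  by_cases h : i < word.length
  · simp only [h, dif_pos]
    cases hidx : PySem.List.index? (word.drop i) p1 with
    | none =>
      have hnm : p1 ∉ word.drop i := (PySem.List.index?_eq_none_iff _ _).mp hidx
      rw [pvMergeA_none p1 p2 _ hnm]
    | some r =>
      rcases (PySem.List.index?_eq_some_iff _ _ _).mp hidx with ⟨pre, suf, hdec, hlen, hnp⟩
      have htake : (word.drop i).take r = pre := by
        rw [hdec, List.take_append_of_le_length (le_of_eq hlen.symm), List.take_of_length_le (le_of_eq hlen)]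
      have hdropj : word.drop (i + r) = p1 :: suf := by
        rw [← List.drop_drop, hdec, ← hlen, List.drop_left]
      have hLlen : word.length - (i + r) = suf.length + 1 := by
        have hc := congrArg List.length hdropj
        simpa using hc
      cases hsuf : suf with
      | nil =>
        -- trailing occurrence of p1: the pair test fails on the length bound
        have hcond : ¬ (i + r + 1 < word.length ∧ word.getD (i + r + 1) "" = p2) := by
          rintro ⟨h1, _⟩
          rw [hsuf] at hLlen; simp at hLlen; omega
        simp only [hcond, if_false]
        rw [ih (i + r + 1) _ (by omega)]
        have hd0 : word.drop (i + r + 1) = [] := by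
          rw [← List.tail_drop, hdropj, hsuf, List.tail_cons]
        rw [hd0, htake, hdec, hsuf, pvMergeA_skip p1 p2 pre [p1] hnp]
        simp [pvMergeA]
      | cons y suf' =>
        have hd1 : word.drop (i + r + 1) = y :: suf' := by
          rw [← List.tail_drop, hdropj, hsuf, List.tail_cons]
        have hy : word.getD (i + r + 1) "" = y := by
          have hg : word[(i + r + 1)]? = some y := by
            have h0 := @List.getElem?_drop _ word (i + r + 1) 0
            rw [hd1] at h0
            simpa using h0.symm
          rw [List.getD_eq_getElem?_getD, hg]; rfl
        have hlt : i + r + 1 < word.length := by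
          rw [hsuf] at hLlen; simp at hLlen; omega
        by_cases hy2 : y = p2
        · -- the next symbol matches: both sides merge the pair
          have hcond : (i + r + 1 < word.length ∧ word.getD (i + r + 1) "" = p2) := ⟨hlt, by rw [hy, hy2]⟩
          simp only [hcond]
          rw [ih (i + r + 2) _ (by omega)]
          have hd2 : word.drop (i + r + 2) = suf' := by
            rw [← List.tail_drop, hd1, List.tail_cons]
          rw [hd2, htake, hdec, hsuf, pvMergeA_skip p1 p2 pre (p1 :: y :: suf') hnp, pvMergeA]
          simp [hy2]
        · -- next symbol differs: both sides emit the lone first symbol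
          have hcond : ¬ (i + r + 1 < word.length ∧ word.getD (i + r + 1) "" = p2) := by
            rintro ⟨_, h2⟩; rw [hy] at h2; exact hy2 h2
          simp only [hcond, if_false]
          rw [ih (i + r + 1) _ (by omega)]
          rw [hd1, htake, hdec, hsuf, pvMergeA_skip p1 p2 pre (p1 :: y :: suf') hnp, pvMergeA]
          simp [hy2]
  · simp only [h, dif_neg, not_false_iff]
    rw [List.drop_eq_nil_of_le (by omega), pvMergeA]
    simp

-- ===== VERDICT (by name: the statement is the Claim_ definition above) =====
theorem merge_word_py_spec : Claim_equal_merge_word_py := by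
  intro word pair _
  unfold Spec_merge_word_py merge_word_py merge_word_py_alt
  rw [pvMergeB_eq word pair.1 pair.2 0 []]
  simp
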